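-- pv_equiv track=rewrite | github.com/sunilsoni/interview-notes-python | com/interview/2025/october/test1/test4.py | solution
-- ===== SOURCE A (Python) =====
-- def solution(deck):
--     n = len(deck)
--     if n == 0:
--         return -1
--     try:
--         k = deck.index(1)
--     except ValueError:
--         return -1
--     for i in range(n):
--         if deck[(k + i) % n] != i + 1:
--             return -1
--     return k
-- ===== SOURCE B (Python) =====
-- def solution(deck):
--     # Closed-form: a valid rotation is fully determined by its first element f,
--     # deck must equal [f..n] + [1..f-1], and the start index is (n + 1 - f) % n.
--     n = len(deck)
--     if n == 0:
--         return -1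
--     f = deck[0]
--     if not (1 <= f <= n):
--         return -1
--     if deck == list(range(f, n + 1)) + list(range(1, f)):
--         return (n + 1 - f) % n
--     return -1
-- ===== Notes on version B (the rewrite author's own statement) =====
-- stated objective: alternative
-- what changed: A searches for the index of 1 and then verifies every position with a modular offset loop; B derives the unique candidate rotation in closed form from the first element alone, compares the whole list against the reconstructed rotation once, and computes the start index arithmetically as (n + 1 - first) % n.
import Mathlib
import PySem

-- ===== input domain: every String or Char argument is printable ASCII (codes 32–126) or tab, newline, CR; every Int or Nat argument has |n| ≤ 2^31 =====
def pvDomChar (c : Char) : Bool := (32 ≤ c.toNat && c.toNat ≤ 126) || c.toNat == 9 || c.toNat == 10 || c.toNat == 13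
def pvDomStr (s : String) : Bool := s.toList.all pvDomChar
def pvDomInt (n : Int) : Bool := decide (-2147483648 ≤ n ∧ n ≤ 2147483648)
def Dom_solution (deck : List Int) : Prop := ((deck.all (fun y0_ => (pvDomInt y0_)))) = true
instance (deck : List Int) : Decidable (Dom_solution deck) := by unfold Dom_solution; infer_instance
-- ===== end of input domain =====

-- B replaces A's two-phase "find index of 1, then verify offsets modulo n" scan by a closed-form
-- reconstruction: the only candidate rotation is determined by the first element alone, it is compared
-- wholesale, and the start index is computed arithmetically (objective: alternative).

-- ===== PORT A =====
-- the loop 'for i in range(n): if deck[(k+i)%n] != i+1: return -1' with early exit, then 'return k'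
def solutionGo (deck : List Int) (k n : Int) : List Int → Int
  | [] => k
  | i :: rest =>
    if PySem.List.pyGet? deck (PySem.Int.mod (k + i) n) ≠ some (i + 1) then -1
    else solutionGo deck k n rest

def solution (deck : List Int) : Int :=
  let n : Int := PySem.List.len deck
  if n = 0 then -1
  else
    match PySem.List.index? deck 1 with
    | none => -1                         -- except ValueError: return -1
    | some k => solutionGo deck (k : Int) n (PySem.List.pyRange 0 n 1)

-- ===== PORT B =====
def solution_alt (deck : List Int) : Int :=
  let n : Int := PySem.List.len deck
  if n = 0 then -1
  else
    let f := PySem.List.pyGetD deck 0 0   -- deck[0]; always in range here since n ≠ 0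
    if ¬ (1 ≤ f ∧ f ≤ n) then -1
    else if deck = PySem.List.pyRange f (n + 1) 1 ++ PySem.List.pyRange 1 f 1 then
      PySem.Int.mod (n + 1 - f) n
    else -1

-- ===== PRECONDITION & SPEC =====
def Spec_solution (deck : List Int) (out : Int) : Prop := out = solution_alt deck
instance (deck : List Int) (out : Int) : Decidable (Spec_solution deck out) := by unfold Spec_solution; infer_instance

-- ===== CLAIM (what is proved, stated in full; the proofs are below) =====
def Claim_equal_solution : Prop := ∀ (deck : List Int), Dom_solution deck → Spec_solution deck (solution deck)

-- ===== LEMMAS AND PROOFS =====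

-- modular-arithmetic helpers (Int emod, positive modulus)
theorem pvModCongr (n a b : Int) (h : n ∣ a - b) : a % n = b % n := by
  obtain ⟨c, hc⟩ := h
  exact Int.modEq_iff_dvd.mpr ⟨-c, by rw [mul_neg, ← hc]; ring⟩

theorem pvModAddMod (n a b : Int) : (a + b % n) % n = (a + b) % n :=
  pvModCongr n _ _ ⟨-(b / n), by rw [Int.emod_def]; ring⟩

theorem pvModSubMod (n a b : Int) : (a - b % n) % n = (a - b) % n :=
  pvModCongr n _ _ ⟨b / n, by rw [Int.emod_def]; ring⟩

theorem pvModSubN (n a : Int) : (a - n) % n = a % n :=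
  pvModCongr n _ _ ⟨-1, by ring⟩

theorem pvDvdSmall (n m : Int) (hn : 0 < n) (h : n ∣ m) (h1 : -n < m) (h2 : m < n) : m = 0 := by
  obtain ⟨c, rfl⟩ := h
  rcases lt_trichotomy c 0 with hc | hc | hc
  · exfalso
    have hle : c ≤ -1 := by omega
    have h3 : n * c ≤ n * (-1) := mul_le_mul_of_nonneg_left hle (le_of_lt hn)
    rw [mul_neg_one] at h3
    linarith
  · rw [hc, mul_zero]
  · exfalso
    have hle : (1 : Int) ≤ c := hc
    have h3 : n * 1 ≤ n * c := mul_le_mul_of_nonneg_left hle (le_of_lt hn)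
    rw [mul_one] at h3
    linarith

-- A's verification loop returns k iff every check passes, else -1
theorem solutionGo_eq (deck : List Int) (k n : Int) (L : List Int) :
    solutionGo deck k n L =
      if ∀ i ∈ L, PySem.List.pyGet? deck (PySem.Int.mod (k + i) n) = some (i + 1) then k
      else -1 := by
  induction L with
  | nil => simp [solutionGo]
  | cons i rest ih =>
    simp only [solutionGo, ih, List.forall_mem_cons]
    by_cases h : PySem.List.pyGet? deck (PySem.Int.mod (k + i) n) = some (i + 1)
    · simp [h]
    · simp [h]

-- pointwise description: "deck is the rotation of 1..n starting at position k"
def rotAt (deck : List Int) (N k : Int) : Prop :=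
  ∀ j (hj : j < deck.length), deck[j] = ((j : Int) - k) % N + 1

theorem loop_iff_rotAt (deck : List Int) (k N : Int) (hN : (deck.length : Int) = N)
    (hn : 0 < N) :
    (∀ i ∈ PySem.List.pyRange 0 N 1,
        PySem.List.pyGet? deck (PySem.Int.mod (k + i) N) = some (i + 1))
      ↔ rotAt deck N k := by
  constructor
  · intro H j hj
    have hjN : (j : Int) < N := by omega
    set i := ((j : Int) - k) % N with hi
    have hi0 : 0 ≤ i := Int.emod_nonneg _ (by omega)
    have hiN : i < N := Int.emod_lt_of_pos _ (by omega)
    have hmem : i ∈ PySem.List.pyRange 0 N 1 := by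
      rw [PySem.List.mem_pyRange_one]; omega
    have h2 := H i hmem
    have hmod : PySem.Int.mod (k + i) N = (j : Int) := by
      rw [PySem.Int.mod_eq_emod_of_pos hn, hi, pvModAddMod]
      have he : k + ((j : Int) - k) = (j : Int) := by ring
      rw [he, Int.emod_eq_of_lt (by omega) hjN]
    rw [hmod, PySem.List.pyGet?_natCast, List.getElem?_eq_getElem hj] at h2
    exact Option.some_inj.mp h2
  · intro H i hmem
    rw [PySem.List.mem_pyRange_one] at hmem
    obtain ⟨hi0, hiN⟩ := hmem
    have hm0 : 0 ≤ (k + i) % N := Int.emod_nonneg _ (by omega)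
    have hmN : (k + i) % N < N := Int.emod_lt_of_pos _ (by omega)
    have hjlen : ((k + i) % N).toNat < deck.length := by omega
    have hget : PySem.List.pyGet? deck (PySem.Int.mod (k + i) N) =
        some (deck[((k + i) % N).toNat]'hjlen) := by
      rw [PySem.Int.mod_eq_emod_of_pos hn]
      exact PySem.List.pyGet?_eq_some_getElem deck hm0 (by omega)
    rw [hget, H _ hjlen, Int.toNat_of_nonneg hm0]
    have key : ((k + i) % N - k) % N = i := by
      have e1 : (k + i) % N - k = -k + (k + i) % N := by ring
      rw [e1, pvModAddMod]
      have e2 : -k + (k + i) = i := by ring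
      rw [e2, Int.emod_eq_of_lt hi0 hiN]
    rw [key]

theorem rotEq_iff (deck : List Int) (f N : Int) (hN : (deck.length : Int) = N)
    (hf1 : 1 ≤ f) (hf2 : f ≤ N) :
    (deck = PySem.List.pyRange f (N + 1) 1 ++ PySem.List.pyRange 1 f 1)
      ↔ ∀ j (hj : j < deck.length), deck[j] = (f - 1 + (j : Int)) % N + 1 := by
  have hl1 : (PySem.List.pyRange f (N + 1) 1).length = (N + 1 - f).toNat := by
    rw [PySem.List.length_pyRange_one]
  have hlen2 : (PySem.List.pyRange f (N + 1) 1 ++ PySem.List.pyRange 1 f 1).length = deck.length := by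
    rw [List.length_append, PySem.List.length_pyRange_one, PySem.List.length_pyRange_one]
    omega
  have hEget : ∀ (j : Nat) (hj : j < (PySem.List.pyRange f (N + 1) 1 ++ PySem.List.pyRange 1 f 1).length),
      (PySem.List.pyRange f (N + 1) 1 ++ PySem.List.pyRange 1 f 1)[j] = (f - 1 + (j : Int)) % N + 1 := by
    intro j hj
    have hjN : (j : Int) < N := by rw [hlen2] at hj; omega
    by_cases hc : j < (PySem.List.pyRange f (N + 1) 1).length
    · rw [List.getElem_append_left hc, PySem.List.getElem_pyRange_one]
      have hb : (j : Int) < N + 1 - f := by rw [hl1] at hc; omega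
      rw [Int.emod_eq_of_lt (by omega) (by omega)]
      ring
    · rw [List.getElem_append_right (not_lt.mp hc), PySem.List.getElem_pyRange_one]
      have hge : (PySem.List.pyRange f (N + 1) 1).length ≤ j := not_lt.mp hc
      have hmod : (f - 1 + (j : Int)) % N = f - 1 + (j : Int) - N := by
        rw [← pvModSubN]
        rw [hl1] at hge
        rw [Int.emod_eq_of_lt (by omega) (by omega)]
      rw [hmod, hl1]
      rw [hl1] at hge
      omega
  constructor
  · intro hE j hj
    have h := List.getElem_of_eq hE hj
    rw [h]
    exact hEget j _
  · intro hp
    apply List.ext_getElem hlen2.symm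
    intro j h1 h2
    rw [hp j h1, hEget j h2]

-- ===== VERDICT (by name: the statement is the Claim_ definition above) =====
theorem solution_spec : Claim_equal_solution := by
  unfold Claim_equal_solution
  intro deck _
  unfold Spec_solution
  by_cases hn0 : deck.length = 0
  · simp [solution, solution_alt, hn0]
  · simp only [solution, solution_alt, PySem.List.len_eq]
    set N : Int := ((deck.length : Nat) : Int) with hNdef
    have hNpos : 0 < N := by omega
    rw [if_neg (by omega : ¬ N = 0), if_neg (by omega : ¬ N = 0)]
    set f := PySem.List.pyGetD deck 0 0 with hfdef
    have hlen0 : 0 < deck.length := Nat.pos_of_ne_zero hn0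
    have hf0 : f = deck[0]'hlen0 := by
      rw [hfdef]
      have h := PySem.List.pyGetD_eq_getElem deck (i := 0) 0 (by norm_num) (by omega)
      simpa using h
    -- a successful A-run forces B's success condition
    have hcore : ∀ kk : Nat, PySem.List.index? deck 1 = some kk →
        (∀ i ∈ PySem.List.pyRange 0 N 1,
          PySem.List.pyGet? deck (PySem.Int.mod ((kk : Int) + i) N) = some (i + 1)) →
        ((1 ≤ f ∧ f ≤ N) ∧
          deck = PySem.List.pyRange f (N + 1) 1 ++ PySem.List.pyRange 1 f 1) ∧
          f = (0 - (kk : Int)) % N + 1 := by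
      intro kk hidx H
      rw [PySem.List.index?_eq_idxOf?, List.idxOf?_eq_some_iff] at hidx
      obtain ⟨hklt, hkval, -⟩ := hidx
      have hrot : rotAt deck N kk := (loop_iff_rotAt deck (kk : Int) N hNdef.symm hNpos).mp H
      have hfval : f = (0 - (kk : Int)) % N + 1 := by
        rw [hf0]
        have h := hrot 0 hlen0
        simpa using h
      have hf1 : 1 ≤ f := by
        have := Int.emod_nonneg (0 - (kk : Int)) (by omega : N ≠ 0)
        omega
      have hf2 : f ≤ N := by
        have := Int.emod_lt_of_pos (0 - (kk : Int)) hNpos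
        omega
      refine ⟨⟨⟨hf1, hf2⟩, ?_⟩, hfval⟩
      refine (rotEq_iff deck f N hNdef.symm hf1 hf2).mpr ?_
      intro j hj
      rw [hrot j hj]
      congr 1
      rw [hfval]
      rw [show (0 - (kk : Int)) % N + 1 - 1 + (j : Int) = (j : Int) + (0 - (kk : Int)) % N by ring,
        pvModAddMod,
        show (j : Int) + (0 - (kk : Int)) = (j : Int) - (kk : Int) by ring]
    by_cases hbound : 1 ≤ f ∧ f ≤ N
    · by_cases hE : deck = PySem.List.pyRange f (N + 1) 1 ++ PySem.List.pyRange 1 f 1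
      · -- both succeed
        rw [if_neg (not_not_intro hbound), if_pos hE]
        obtain ⟨hf1, hf2⟩ := hbound
        have hp := (rotEq_iff deck f N hNdef.symm hf1 hf2).mp hE
        set k0 : Int := (N + 1 - f) % N with hk0def
        have hk00 : 0 ≤ k0 := Int.emod_nonneg _ (by omega)
        have hk0N : k0 < N := Int.emod_lt_of_pos _ (by omega)
        have hshift : ∀ j : Int, (j - k0) % N = (f - 1 + j) % N := by
          intro j
          rw [hk0def, pvModSubMod,
            show j - (N + 1 - f) = (f - 1 + j) - N by ring, pvModSubN]
        have hrot : rotAt deck N k0 := by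
          intro j hj
          rw [hp j hj, hshift]
        have hk0lt : k0.toNat < deck.length := by omega
        have hone : deck[k0.toNat]'hk0lt = 1 := by
          rw [hrot k0.toNat hk0lt, Int.toNat_of_nonneg hk00]
          simp
        have hfirst : ∀ j (hj2 : j < k0.toNat), ¬ deck[j]'(by omega) = 1 := by
          intro j hj2 hcontra
          rw [hrot j (by omega)] at hcontra
          have h0 : ((j : Int) - k0) % N = 0 := by omega
          have hdvd : N ∣ ((j : Int) - k0) := Int.dvd_of_emod_eq_zero h0
          have := pvDvdSmall N ((j : Int) - k0) hNpos hdvd (by omega) (by omega)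
          omega
        have hidx : PySem.List.index? deck 1 = some k0.toNat := by
          rw [PySem.List.index?_eq_idxOf?, List.idxOf?_eq_some_iff]
          exact ⟨hk0lt, hone, fun j hj => hfirst j hj⟩
        rw [hidx]
        show solutionGo deck ((k0.toNat : Nat) : Int) N (PySem.List.pyRange 0 N 1)
            = PySem.Int.mod (N + 1 - f) N
        rw [solutionGo_eq, if_pos
          (by rw [(Int.toNat_of_nonneg hk00 : ((k0.toNat : Nat) : Int) = k0)]
              exact (loop_iff_rotAt deck k0 N hNdef.symm hNpos).mpr hrot)]
        rw [Int.toNat_of_nonneg hk00, PySem.Int.mod_eq_emod_of_pos hNpos, hk0def]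
      · -- B fails the equality test; show A also returns -1
        rw [if_neg (not_not_intro hbound), if_neg hE]
        cases hidx : PySem.List.index? deck 1 with
        | none => rfl
        | some kk =>
          show solutionGo deck ((kk : Nat) : Int) N (PySem.List.pyRange 0 N 1) = -1
          rw [solutionGo_eq]
          split_ifs with H
          · exact absurd (hcore kk hidx H).1.2 hE
          · rfl
    · -- B fails the bounds test; show A also returns -1
      rw [if_pos hbound]
      cases hidx : PySem.List.index? deck 1 with
      | none => rfl
      | some kk =>
        show solutionGo deck ((kk : Nat) : Int) N (PySem.List.pyRange 0 N 1) = -1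
        rw [solutionGo_eq]
        split_ifs with H
        · exact absurd (hcore kk hidx H).1.1 hbound
        · rfl
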